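-- pv_equiv track=rewrite | github.com/yash101/Website | tools/wordpress-importer.py | split_markdown_summary
-- ===== SOURCE A (Python) =====
-- def split_markdown_summary(markdown):
--     """
--     Split markdown into a summary (first up-to-3 non-empty lines) and the remainder.
--     """
--     lines = markdown.splitlines()
--     summary_lines = []
--     detail_lines = []
--     count = 0
--     for line in lines:
--         if line.strip() and count < 3:
--             summary_lines.append(line)
--             count += 1
--         else:
--             detail_lines.append(line)
--     summary = "\n".join(summary_lines)
--     detail = "\n".join(detail_lines)
--     return summary, detail
-- ===== SOURCE B (Python) =====
-- def split_markdown_summary(markdown):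
--     lines = markdown.splitlines()
--     # locate cutoff: index just past the 3rd non-blank line (len(lines) if fewer)
--     c = len(lines)
--     seen = 0
--     for i, line in enumerate(lines):
--         if line.strip():
--             seen += 1
--             if seen == 3:
--                 c = i + 1
--                 break
--     prefix = lines[:c]
--     summary = "\n".join([l for l in prefix if l.strip()])
--     detail = "\n".join([l for l in prefix if not l.strip()] + lines[c:])
--     return summary, detail
-- ===== Notes on version B (the rewrite author's own statement) =====
-- stated objective: alternative
-- what changed: Replaces the single dual-append loop with counter by a locate-the-cutoff scan (index just past the 3rd non-blank line) followed by filtering the prefix into summary/detail and appending the untouched suffix to detail.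
import Mathlib
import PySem

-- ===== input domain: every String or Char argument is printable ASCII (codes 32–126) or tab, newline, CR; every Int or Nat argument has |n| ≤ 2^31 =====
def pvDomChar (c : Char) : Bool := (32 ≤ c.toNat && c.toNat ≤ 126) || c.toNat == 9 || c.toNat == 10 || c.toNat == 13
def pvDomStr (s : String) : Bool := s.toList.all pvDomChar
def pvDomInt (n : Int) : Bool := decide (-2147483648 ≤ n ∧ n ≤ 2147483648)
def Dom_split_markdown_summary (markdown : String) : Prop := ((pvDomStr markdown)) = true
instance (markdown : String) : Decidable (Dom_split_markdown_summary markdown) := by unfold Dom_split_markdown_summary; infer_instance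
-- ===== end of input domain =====

-- B replaces A's dual-append loop with a find-the-cutoff scan then prefix partition; alternative decomposition, same cost.

-- ===== PORT A =====
-- A's for-loop over the lines with state (summary_lines, detail_lines, count), as structural recursion
def pvLoopA : List String → Nat → List String × List String
  | [], _ => ([], [])
  | l :: ls, count =>
    if (PySem.Str.strip l != "") && decide (count < 3) then
      let r := pvLoopA ls (count + 1)
      (l :: r.1, r.2)
    else
      let r := pvLoopA ls count
      (r.1, l :: r.2)

def split_markdown_summary (markdown : String) : String × String :=
  let lines := PySem.Str.splitlines markdown
  let r := pvLoopA lines 0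
  (PySem.Str.join "\n" r.1, PySem.Str.join "\n" r.2)

-- ===== PORT B =====
-- B's cutoff loop: index just past the 3rd non-blank line, or len(lines) if fewer
def pvCutoffB : List String → Nat → Nat → Nat
  | [], _, i => i
  | l :: ls, seen, i =>
    if PySem.Str.strip l != "" then
      if seen + 1 == 3 then i + 1 else pvCutoffB ls (seen + 1) (i + 1)
    else pvCutoffB ls seen (i + 1)

def split_markdown_summary_alt (markdown : String) : String × String :=
  let lines := PySem.Str.splitlines markdown
  let c := pvCutoffB lines 0 0
  let pre := List.take c lines
  (PySem.Str.join "\n" (pre.filter (fun l => PySem.Str.strip l != "")),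
   PySem.Str.join "\n" (pre.filter (fun l => !(PySem.Str.strip l != "")) ++ List.drop c lines))

-- ===== PRECONDITION & SPEC =====
def Spec_split_markdown_summary (markdown : String) (out : String × String) : Prop := out = split_markdown_summary_alt markdown
instance (markdown : String) (out : String × String) : Decidable (Spec_split_markdown_summary markdown out) := by unfold Spec_split_markdown_summary; infer_instance

-- ===== CLAIM (what is proved, stated in full; the proofs are below) =====
def Claim_equal_split_markdown_summary : Prop := ∀ (markdown : String), Dom_split_markdown_summary markdown → Spec_split_markdown_summary markdown (split_markdown_summary markdown)

-- ===== LEMMAS AND PROOFS =====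

theorem pvCutoffB_shift (ls : List String) : ∀ (seen i : Nat),
    pvCutoffB ls seen (i + 1) = pvCutoffB ls seen i + 1 := by
  induction ls with
  | nil => intro seen i; simp [pvCutoffB]
  | cons l ls ih =>
    intro seen i
    simp only [pvCutoffB]
    split_ifs <;> simp [ih]

theorem pvLoopA_ge (ls : List String) : ∀ (n : Nat), 3 ≤ n → pvLoopA ls n = ([], ls) := by
  induction ls with
  | nil => intro n _; simp [pvLoopA]
  | cons l ls ih =>
    intro n hn
    have : ¬ n < 3 := by omega
    simp [pvLoopA, this, ih n hn]

theorem pvLoopA_key (ls : List String) : ∀ (n : Nat), n < 3 →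
    pvLoopA ls n =
      ((List.take (pvCutoffB ls n 0) ls).filter (fun l => PySem.Str.strip l != ""),
       (List.take (pvCutoffB ls n 0) ls).filter (fun l => !(PySem.Str.strip l != "")) ++
         List.drop (pvCutoffB ls n 0) ls) := by
  induction ls with
  | nil => intro n _; simp [pvLoopA, pvCutoffB]
  | cons l ls ih =>
    intro n hn
    by_cases hp : (PySem.Str.strip l != "") = true
    · by_cases h3 : n + 1 = 3
      · have : (n + 1 == 3) = true := by simp [h3]
        simp only [pvLoopA, pvCutoffB, hp, this, if_true, hn]
        simp [pvLoopA_ge ls (n + 1) (by omega), hp]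
      · have h3' : (n + 1 == 3) = false := by simp; omega
        have hlt : n + 1 < 3 := by omega
        simp only [pvLoopA, pvCutoffB, hp, h3', if_true]
        rw [pvCutoffB_shift ls (n + 1) 0]
        simp [List.take_succ_cons, List.drop_succ_cons, hp, decide_eq_true hn,
          ih (n + 1) hlt]
    · have hp' : (PySem.Str.strip l != "") = false := by simpa using hp
      simp only [pvLoopA, pvCutoffB, hp', Bool.false_and]
      rw [pvCutoffB_shift ls n 0]
      simp [List.take_succ_cons, List.drop_succ_cons, hp', ih n hn]

-- ===== VERDICT (by name: the statement is the Claim_ definition above) =====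
theorem split_markdown_summary_spec : Claim_equal_split_markdown_summary := by
  intro markdown _
  unfold Spec_split_markdown_summary split_markdown_summary split_markdown_summary_alt
  simp [pvLoopA_key (PySem.Str.splitlines markdown) 0 (by omega)]
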